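-- pv_equiv track=rewrite | github.com/SrGrace/InterviewBit | Heaps And Maps/MaximumSumCombinations.py | solve
-- ===== SOURCE A (Python) =====
-- def solve(A, B, C):
--     A.sort(reverse=True) # O(nlogn)
--     B.sort(reverse=True) # O(nlogn)
--
--     import heapq
--     max_heap = []
--     visited = set()
--
--     # push largest sum into heap
--     heapq.heappush(max_heap, (-(A[0]+B[0]), 0, 0))
--     visited.add((0, 0))
--
--     result = list()
--     for _ in range(C):
--         if not max_heap:
--             break
--
--         # get largest sum and indices
--         curr_sum, i, j = heapq.heappop(max_heap) # O(clogc)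
--         result.append(-curr_sum)
--
--         # explore next possible sums
--         # (i+1, j) if possible
--         if i+1 < len(A) and (i+1, j) not in visited:
--             heapq.heappush(max_heap, (-(A[i+1]+B[j]), i+1, j)) # O(clogc)
--             visited.add((i+1, j))
--
--         # (i, j+1) if possible
--         if j+1 < len(B) and (i, j+1) not in visited:
--             heapq.heappush(max_heap, (-(A[i]+B[j+1]), i, j+1)) # O(clogc)
--             visited.add((i, j+1))
--
--     return result # final: O(nlogn + clogc)
-- ===== SOURCE B (Python) =====
-- def solve(A, B, C):
--     A.sort(reverse=True)  # reproduce A's in-place mutation of both arguments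
--     B.sort(reverse=True)
--     sums = sorted((a + b for a in A for b in B), reverse=True)
--     return sums[:max(C, 0)]
-- ===== Notes on version B (the rewrite author's own statement) =====
-- stated objective: simpler
-- what changed: Replaces the best-first heap expansion with visited-set bookkeeping by materializing all pairwise sums, sorting them once in descending order, and slicing the first max(C,0) elements.
import Mathlib
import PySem

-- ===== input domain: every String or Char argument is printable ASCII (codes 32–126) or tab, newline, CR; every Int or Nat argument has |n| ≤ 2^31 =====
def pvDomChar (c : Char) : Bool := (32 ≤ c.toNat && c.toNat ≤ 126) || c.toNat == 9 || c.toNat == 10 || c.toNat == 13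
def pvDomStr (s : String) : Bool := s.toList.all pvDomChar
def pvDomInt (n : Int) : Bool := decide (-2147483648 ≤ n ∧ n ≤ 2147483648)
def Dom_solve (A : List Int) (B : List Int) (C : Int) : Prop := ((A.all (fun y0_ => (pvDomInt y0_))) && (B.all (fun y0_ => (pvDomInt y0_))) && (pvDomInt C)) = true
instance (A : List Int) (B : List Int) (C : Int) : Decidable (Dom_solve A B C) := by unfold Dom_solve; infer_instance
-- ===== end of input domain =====

-- B replaces A's best-first heap expansion by "materialize all pairwise sums, sort once descending,
-- slice"; objective: simpler.  Both programs sort their two list arguments in place descending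
-- (the mutation is identical); the theorems below are about the return value.

-- ===== PORT A =====
-- heapq is modelled by its documented semantics: the heap is the list of entries, heappush appends,
-- heappop removes the lexicographically smallest tuple.  This is exact for this program: every
-- pushed tuple is distinct (the `visited` set guards re-pushes), so the minimum is unique and the
-- pop sequence equals CPython's.
def pvLexLe (x y : Int × Int × Int) : Bool :=
  decide (x.1 < y.1) ||
    (decide (x.1 = y.1) &&
      (decide (x.2.1 < y.2.1) || (decide (x.2.1 = y.2.1) && decide (x.2.2 ≤ y.2.2))))

def pvMinEntry (cur : Int × Int × Int) : List (Int × Int × Int) → Int × Int × Int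
  | [] => cur
  | x :: xs => pvMinEntry (if pvLexLe x cur then x else cur) xs

-- `if i+1 < len(A) and (i+1, j) not in visited: heappush(...); visited.add(...)`
def pvPush1 (A' B' : List Int) (t : Int × Int × Int)
    (st : List (Int × Int × Int) × PySem.Set (Int × Int)) :
    List (Int × Int × Int) × PySem.Set (Int × Int) :=
  if t.2.1 + 1 < PySem.List.len A' ∧ PySem.Set.contains st.2 (t.2.1 + 1, t.2.2) = false then
    (st.1 ++ [(-(PySem.List.pyGetD A' (t.2.1 + 1) 0 + PySem.List.pyGetD B' t.2.2 0), t.2.1 + 1, t.2.2)],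
     PySem.Set.add st.2 (t.2.1 + 1, t.2.2))
  else st

-- `if j+1 < len(B) and (i, j+1) not in visited: heappush(...); visited.add(...)`
def pvPush2 (A' B' : List Int) (t : Int × Int × Int)
    (st : List (Int × Int × Int) × PySem.Set (Int × Int)) :
    List (Int × Int × Int) × PySem.Set (Int × Int) :=
  if t.2.2 + 1 < PySem.List.len B' ∧ PySem.Set.contains st.2 (t.2.1, t.2.2 + 1) = false then
    (st.1 ++ [(-(PySem.List.pyGetD A' t.2.1 0 + PySem.List.pyGetD B' (t.2.2 + 1) 0), t.2.1, t.2.2 + 1)],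
     PySem.Set.add st.2 (t.2.1, t.2.2 + 1))
  else st

-- the `for _ in range(C)` loop of A (fuel = number of remaining iterations)
def pvLoop (A' B' : List Int) :
    Nat → List (Int × Int × Int) → PySem.Set (Int × Int) → List Int → List Int
  | 0, _, _, result => result
  | _ + 1, [], _, result => result                       -- if not max_heap: break
  | fuel + 1, h0 :: hs, visited, result =>
    let t := pvMinEntry h0 hs                            -- heapq.heappop
    let st := pvPush2 A' B' t (pvPush1 A' B' t ((h0 :: hs).erase t, visited))
    pvLoop A' B' fuel st.1 st.2 (result ++ [-t.1])       -- result.append(-curr_sum)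

def solve (A : List Int) (B : List Int) (C : Int) : List Int :=
  let A' := PySem.List.sorted A (fun x => x) true        -- A.sort(reverse=True)
  let B' := PySem.List.sorted B (fun x => x) true        -- B.sort(reverse=True)
  match PySem.List.pyGet? A' 0, PySem.List.pyGet? B' 0 with
  | some a0, some b0 =>
    pvLoop A' B' C.toNat [(-(a0 + b0), 0, 0)]
      (PySem.Set.add PySem.Set.empty ((0 : Int), (0 : Int))) []
  | _, _ => []                                           -- A[0]+B[0] raised IndexError: outside Pre_solve

-- ===== PORT B =====
def solve_alt (A : List Int) (B : List Int) (C : Int) : List Int :=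
  let A' := PySem.List.sorted A (fun x => x) true        -- A.sort(reverse=True)
  let B' := PySem.List.sorted B (fun x => x) true        -- B.sort(reverse=True)
  let sums := PySem.List.sorted (A'.flatMap (fun a => B'.map (fun b => a + b))) (fun x => x) true
  PySem.List.slice sums none (some (max C 0))            -- sums[:max(C, 0)]

-- ===== PRECONDITION & SPEC =====
-- Pre_ excludes exactly the inputs where A raises IndexError (A[0] or B[0] on an empty list).
def Pre_solve (A : List Int) (B : List Int) (C : Int) : Prop := A ≠ [] ∧ B ≠ []
instance (A : List Int) (B : List Int) (C : Int) : Decidable (Pre_solve A B C) := by unfold Pre_solve; infer_instance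
def pvWitness_solve : List Int × List Int × Int := ([1, 2], [3], 2)

def Spec_solve (A : List Int) (B : List Int) (C : Int) (out : List Int) : Prop := out = solve_alt A B C
instance (A : List Int) (B : List Int) (C : Int) (out : List Int) : Decidable (Spec_solve A B C out) := by unfold Spec_solve; infer_instance

-- ===== CLAIM (what is proved, stated in full; the proofs are below) =====
def Claim_equal_solve : Prop := ∀ (A : List Int) (B : List Int) (C : Int), Dom_solve A B C → Pre_solve A B C → Spec_solve A B C (solve A B C)

-- ===== LEMMAS AND PROOFS =====

-- abbreviations used only by the proofs
def pvIdx (t : Int × Int × Int) : Int × Int := (t.2.1, t.2.2)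
def pvGrid (n m : Nat) : List (Int × Int) :=
  (List.range n).flatMap (fun (i : Nat) => (List.range m).map (fun (j : Nat) => ((i : Int), (j : Int))))
def pvSumAt (A' B' : List Int) (p : Int × Int) : Int :=
  PySem.List.pyGetD A' p.1 0 + PySem.List.pyGetD B' p.2 0
def pvS (l : List Int) : List Int := PySem.List.sorted l (fun x => x) true
def pvAll (A' B' : List Int) : List Int := (pvGrid A'.length B'.length).map (pvSumAt A' B')
def pvRem (A' B' : List Int) (P : List (Int × Int)) : List Int :=
  ((pvGrid A'.length B'.length).filter (fun p => decide (p ∉ P))).map (pvSumAt A' B')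

-- the loop invariant: P is the list of popped cells, the heap holds the frontier
structure PvInv (A' B' : List Int) (heap : List (Int × Int × Int))
    (visited : List (Int × Int)) (P : List (Int × Int)) : Prop where
  entries : ∀ t ∈ heap, 0 ≤ t.2.1 ∧ t.2.1 < (A'.length : Int) ∧ 0 ≤ t.2.2 ∧
      t.2.2 < (B'.length : Int) ∧ t.1 = -(pvSumAt A' B' (pvIdx t))
  nodupIdx : (heap.map pvIdx).Nodup
  Pgrid : ∀ p ∈ P, p ∈ pvGrid A'.length B'.length
  Pdown1 : ∀ p ∈ P, p.1 = 0 ∨ (p.1 - 1, p.2) ∈ P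
  Pdown2 : ∀ p ∈ P, p.2 = 0 ∨ (p.1, p.2 - 1) ∈ P
  Pclose1 : ∀ p ∈ P, p.1 + 1 < (A'.length : Int) → (p.1 + 1, p.2) ∈ visited
  Pclose2 : ∀ p ∈ P, p.2 + 1 < (B'.length : Int) → (p.1, p.2 + 1) ∈ visited
  vmem : ∀ q, q ∈ visited ↔ (q ∈ P ∨ q ∈ heap.map pvIdx)
  disj : ∀ q ∈ P, q ∉ heap.map pvIdx
  vdown1 : ∀ p ∈ visited, p.1 = 0 ∨ (p.1 - 1, p.2) ∈ visited
  vdown2 : ∀ p ∈ visited, p.2 = 0 ∨ (p.1, p.2 - 1) ∈ visited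
  origin : ((0 : Int), (0 : Int)) ∈ visited

theorem pvLexLe_total (a b : Int × Int × Int) : pvLexLe a b = true ∨ pvLexLe b a = true := by
  simp only [pvLexLe, Bool.or_eq_true, Bool.and_eq_true, decide_eq_true_eq]; omega

theorem pvLexLe_trans {a b c : Int × Int × Int} (h1 : pvLexLe a b = true) (h2 : pvLexLe b c = true) :
    pvLexLe a c = true := by
  simp only [pvLexLe, Bool.or_eq_true, Bool.and_eq_true, decide_eq_true_eq] at *; omega

theorem pvMinEntry_mem (cur : Int × Int × Int) (xs : List (Int × Int × Int)) :
    pvMinEntry cur xs ∈ cur :: xs := by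
  induction xs generalizing cur with
  | nil => simp [pvMinEntry]
  | cons x xs ih =>
    simp only [pvMinEntry]
    by_cases hx : pvLexLe x cur = true
    · rw [if_pos hx]
      rcases List.mem_cons.1 (ih x) with h | h <;> simp [h]
    · rw [if_neg hx]
      rcases List.mem_cons.1 (ih cur) with h | h <;> simp [h]

theorem pvMinEntry_le (cur : Int × Int × Int) (xs : List (Int × Int × Int)) :
    ∀ u ∈ cur :: xs, pvLexLe (pvMinEntry cur xs) u = true := by
  induction xs generalizing cur with
  | nil =>
    intro u hu
    simp only [List.mem_cons, List.not_mem_nil, or_false] at hu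
    subst hu
    rcases pvLexLe_total u u with h | h <;> simpa [pvMinEntry] using h
  | cons x xs ih =>
    intro u hu
    simp only [pvMinEntry]
    by_cases hx : pvLexLe x cur = true
    · rw [if_pos hx]
      have hminx : pvLexLe (pvMinEntry x xs) x = true := ih x x (List.mem_cons_self ..)
      rcases List.mem_cons.1 hu with rfl | hu'
      · exact pvLexLe_trans hminx hx
      · rcases List.mem_cons.1 hu' with rfl | hu''
        · exact hminx
        · exact ih x u (List.mem_cons_of_mem _ hu'')
    · rw [if_neg hx]
      have hminc : pvLexLe (pvMinEntry cur xs) cur = true := ih cur cur (List.mem_cons_self ..)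
      rcases List.mem_cons.1 hu with rfl | hu'
      · exact hminc
      · rcases List.mem_cons.1 hu' with rfl | hu''
        · rcases pvLexLe_total u cur with h | h
          · exact absurd h hx
          · exact pvLexLe_trans hminc h
        · exact ih cur u (List.mem_cons_of_mem _ hu'')

theorem pvS_pairwise (l : List Int) : (pvS l).Pairwise (fun a b => b ≤ a) :=
  PySem.List.sorted_pairwise_rev (xs := l) (key := fun x => x)

theorem pvS_perm (l : List Int) : (pvS l).Perm l := PySem.List.sorted_perm ..

theorem pvS_congr {l l' : List Int} (h : l.Perm l') : pvS l = pvS l' :=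
  ((pvS_perm l).trans (h.trans (pvS_perm l').symm)).eq_of_pairwise
    (fun _ _ _ _ h1 h2 => le_antisymm h2 h1) (pvS_pairwise l) (pvS_pairwise l')

theorem pvS_max_cons {l : List Int} {s : Int} (hs : s ∈ l) (hmax : ∀ x ∈ l, x ≤ s) :
    pvS l = s :: pvS (l.erase s) := by
  have hperm : (pvS l).Perm (s :: pvS (l.erase s)) :=
    (pvS_perm l).trans ((List.perm_cons_erase hs).trans (List.Perm.cons s (pvS_perm (l.erase s)).symm))
  refine hperm.eq_of_pairwise (fun _ _ _ _ h1 h2 => le_antisymm h2 h1) (pvS_pairwise l) ?_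
  rw [List.pairwise_cons]
  exact ⟨fun x hx => hmax x (List.mem_of_mem_erase ((pvS_perm _).mem_iff.1 hx)), pvS_pairwise _⟩

theorem mem_pvGrid {n m : Nat} {p : Int × Int} :
    p ∈ pvGrid n m ↔ 0 ≤ p.1 ∧ p.1 < (n : Int) ∧ 0 ≤ p.2 ∧ p.2 < (m : Int) := by
  obtain ⟨x, y⟩ := p
  simp only [pvGrid, List.mem_flatMap, List.mem_map, List.mem_range, Prod.mk.injEq]
  constructor
  · rintro ⟨i, hi, j, hj, rfl, rfl⟩
    refine ⟨by positivity, by exact_mod_cast hi, by positivity, by exact_mod_cast hj⟩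
  · rintro ⟨hx0, hxn, hy0, hym⟩
    exact ⟨x.toNat, by omega, y.toNat, by omega, by omega, by omega⟩

theorem nodup_pvGrid (n m : Nat) : (pvGrid n m).Nodup := by
  have he : pvGrid n m
      = ((List.range n).map (fun i : Nat => (i : Int))) ×ˢ ((List.range m).map (fun j : Nat => (j : Int))) := by
    simp only [pvGrid, SProd.sprod, List.product, List.flatMap_map, List.map_map, Function.comp_def]
  rw [he]
  apply List.Nodup.product <;>
    exact List.Nodup.map (fun a b h => by exact_mod_cast h) List.nodup_range

theorem pvMapRange (L : List Int) :
    (List.range L.length).map (fun n : Nat => PySem.List.pyGetD L (n : Int) 0) = L := by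
  apply List.ext_getElem
  · simp
  · intro i h1 h2
    rw [List.getElem_map, List.getElem_range, PySem.List.pyGetD_natCast]
    exact List.getD_eq_getElem L 0 h2

theorem pvAll_eq (A' B' : List Int) :
    pvAll A' B' = A'.flatMap (fun a => B'.map (fun b => a + b)) := by
  conv_rhs => rw [← pvMapRange A']
  rw [List.flatMap_map]
  unfold pvAll pvGrid
  rw [List.map_flatMap]
  refine List.flatMap_congr ?_
  intro i _
  rw [List.map_map]
  conv_rhs => rw [← pvMapRange B']
  rw [List.map_map]
  refine List.map_congr_left ?_
  intro j _
  simp [pvSumAt]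

-- descending-sorted access is antitone
theorem pvSorted_anti {L : List Int} (h : L.Pairwise (fun x y => y ≤ x)) {i i' : Int}
    (h0 : 0 ≤ i) (hii : i ≤ i') (hlt : i' < (L.length : Int)) :
    PySem.List.pyGetD L i' 0 ≤ PySem.List.pyGetD L i 0 := by
  rcases eq_or_lt_of_le hii with rfl | hlt'
  · exact le_refl _
  · rw [PySem.List.pyGetD_eq_getElem L 0 h0 (lt_trans hlt' hlt),
      PySem.List.pyGetD_eq_getElem L 0 (le_trans h0 hii) hlt]
    exact (List.pairwise_iff_getElem.1 h) i.toNat i'.toNat (by omega) (by omega) (by omega)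

theorem pvRem_nil (A' B' : List Int) : pvRem A' B' [] = pvAll A' B' := by
  simp [pvRem, pvAll]

theorem pvRem_step (A' B' : List Int) (P : List (Int × Int)) (q : Int × Int)
    (hq : q ∈ pvGrid A'.length B'.length) (hqP : q ∉ P) :
    (pvRem A' B' (P ++ [q])).Perm ((pvRem A' B' P).erase (pvSumAt A' B' q)) := by
  set G := (pvGrid A'.length B'.length).filter (fun p => decide (p ∉ P)) with hG
  have hGn : G.Nodup := (nodup_pvGrid _ _).filter _
  have hqG : q ∈ G := by
    rw [hG, List.mem_filter]; exact ⟨hq, by simpa using hqP⟩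
  have h1 : (pvGrid A'.length B'.length).filter (fun p => decide (p ∉ P ++ [q]))
      = G.filter (fun p => p != q) := by
    rw [hG, List.filter_filter]
    refine List.filter_congr ?_
    intro p _
    simp only [List.mem_append, List.mem_singleton, Bool.and_eq_true, decide_eq_true_eq, bne_iff_ne]
    by_cases h : p ∈ P <;> by_cases h2 : p = q <;> simp [h, h2]
  have h2 : (pvRem A' B' (P ++ [q])) = (G.erase q).map (pvSumAt A' B') := by
    rw [pvRem, h1, hGn.erase_eq_filter q]
  rw [h2]
  have hp1 : (G.map (pvSumAt A' B')).Perm (pvSumAt A' B' q :: (G.erase q).map (pvSumAt A' B')) :=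
    (List.perm_cons_erase hqG).map _
  have hp2 : (G.map (pvSumAt A' B')).Perm
      (pvSumAt A' B' q :: (G.map (pvSumAt A' B')).erase (pvSumAt A' B' q)) :=
    List.perm_cons_erase (List.mem_map_of_mem hqG)
  exact (hp1.symm.trans hp2).cons_inv

-- every unpopped cell has a frontier ancestor (smaller in both coordinates)
theorem pvAncestor {A' B' : List Int} {heap : List (Int × Int × Int)}
    {visited P : List (Int × Int)} (inv : PvInv A' B' heap visited P) :
    ∀ p : Int × Int, p ∈ pvGrid A'.length B'.length → p ∉ P →
      ∃ u ∈ heap, u.2.1 ≤ p.1 ∧ u.2.2 ≤ p.2 := by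
  suffices H : ∀ (k : Nat) (p : Int × Int), (p.1 + p.2).toNat = k →
      p ∈ pvGrid A'.length B'.length → p ∉ P → ∃ u ∈ heap, u.2.1 ≤ p.1 ∧ u.2.2 ≤ p.2 by
    intro p hp hP; exact H _ p rfl hp hP
  intro k
  induction k using Nat.strong_induction_on with
  | _ k ih =>
    intro p hk hp hP
    obtain ⟨hx0, hxn, hy0, hym⟩ := mem_pvGrid.1 hp
    by_cases hv : p ∈ visited
    · rcases (inv.vmem p).1 hv with h | h
      · exact absurd h hP
      · obtain ⟨u, hu, hue⟩ := List.mem_map.1 h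
        exact ⟨u, hu, by rw [← hue]; exact ⟨le_refl _, le_refl _⟩⟩
    · by_cases hx : p.1 = 0
      · by_cases hy : p.2 = 0
        · exact absurd (by rw [show p = ((0:Int),(0:Int)) from Prod.ext hx hy]; exact inv.origin) hv
        · -- step down in j
          have hq : (p.1, p.2 - 1) ∈ pvGrid A'.length B'.length := mem_pvGrid.2 (by simp; omega)
          by_cases hqP : (p.1, p.2 - 1) ∈ P
          · have := inv.Pclose2 _ hqP (by simp; omega)
            simp only [show p.1 - 1 + 1 = p.1 by ring, show p.2 - 1 + 1 = p.2 by ring] at this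
            exact absurd (by simpa using this) hv
          · obtain ⟨u, hu, h1, h2⟩ := ih ((p.1 + (p.2 - 1)).toNat) (by omega) _ rfl hq hqP
            dsimp only at h1 h2
            exact ⟨u, hu, by omega⟩
      · -- step down in i
        have hq : (p.1 - 1, p.2) ∈ pvGrid A'.length B'.length := mem_pvGrid.2 (by simp; omega)
        by_cases hqP : (p.1 - 1, p.2) ∈ P
        · have := inv.Pclose1 _ hqP (by simp; omega)
          simp only [show p.1 - 1 + 1 = p.1 by ring] at this
          exact absurd (by simpa using this) hv
        · obtain ⟨u, hu, h1, h2⟩ := ih ((p.1 - 1 + p.2).toNat) (by omega) _ rfl hq hqP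
          dsimp only at h1 h2
          exact ⟨u, hu, by omega⟩


-- facts about the popped minimum entry
theorem pvPop_facts {A' B' : List Int}
    (hA : A'.Pairwise (fun x y => y ≤ x)) (hB : B'.Pairwise (fun x y => y ≤ x))
    {h0 : Int × Int × Int} {hs : List (Int × Int × Int)} {visited P : List (Int × Int)}
    (inv : PvInv A' B' (h0 :: hs) visited P) :
    pvIdx (pvMinEntry h0 hs) ∈ pvGrid A'.length B'.length ∧
    pvIdx (pvMinEntry h0 hs) ∉ P ∧
    (pvMinEntry h0 hs).1 = -(pvSumAt A' B' (pvIdx (pvMinEntry h0 hs))) ∧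
    (∀ x ∈ pvRem A' B' P, x ≤ pvSumAt A' B' (pvIdx (pvMinEntry h0 hs))) := by
  set t := pvMinEntry h0 hs with ht
  have ht_mem : t ∈ h0 :: hs := pvMinEntry_mem h0 hs
  have ht_min : ∀ u ∈ h0 :: hs, pvLexLe t u = true := pvMinEntry_le h0 hs
  obtain ⟨hti0, htin, htj0, htjm, htv⟩ := inv.entries t ht_mem
  refine ⟨mem_pvGrid.2 ⟨hti0, htin, htj0, htjm⟩,
    fun hP => inv.disj _ hP (List.mem_map_of_mem ht_mem), htv, ?_⟩
  intro x hx
  obtain ⟨p, hpfil, rfl⟩ := List.mem_map.1 hx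
  obtain ⟨hpgrid, hpP⟩ := List.mem_filter.1 hpfil
  rw [decide_eq_true_eq] at hpP
  obtain ⟨u, hu, h1, h2⟩ := pvAncestor inv p hpgrid hpP
  obtain ⟨hui0, huin, huj0, hujm, huv⟩ := inv.entries u hu
  obtain ⟨hp1, hpn, hp2, hpm⟩ := mem_pvGrid.1 hpgrid
  have hmono1 : PySem.List.pyGetD A' p.1 0 ≤ PySem.List.pyGetD A' u.2.1 0 :=
    pvSorted_anti hA hui0 h1 hpn
  have hmono2 : PySem.List.pyGetD B' p.2 0 ≤ PySem.List.pyGetD B' u.2.2 0 :=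
    pvSorted_anti hB huj0 h2 hpm
  have hle := ht_min u hu
  simp only [pvLexLe, Bool.or_eq_true, Bool.and_eq_true, decide_eq_true_eq] at hle
  simp only [pvSumAt, pvIdx] at huv htv ⊢
  omega

-- invariant preservation through one pop-and-push step
theorem pvStepInv {A' B' : List Int}
    (hA : A'.Pairwise (fun x y => y ≤ x)) (hB : B'.Pairwise (fun x y => y ≤ x))
    {h0 : Int × Int × Int} {hs : List (Int × Int × Int)} {visited P : List (Int × Int)}
    (inv : PvInv A' B' (h0 :: hs) visited P) :
    PvInv A' B'
      (pvPush2 A' B' (pvMinEntry h0 hs)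
        (pvPush1 A' B' (pvMinEntry h0 hs) ((h0 :: hs).erase (pvMinEntry h0 hs), visited))).1
      (pvPush2 A' B' (pvMinEntry h0 hs)
        (pvPush1 A' B' (pvMinEntry h0 hs) ((h0 :: hs).erase (pvMinEntry h0 hs), visited))).2
      (P ++ [pvIdx (pvMinEntry h0 hs)]) := by
  set t := pvMinEntry h0 hs with ht
  have ht_mem : t ∈ h0 :: hs := pvMinEntry_mem h0 hs
  have ht_min : ∀ u ∈ h0 :: hs, pvLexLe t u = true := pvMinEntry_le h0 hs
  obtain ⟨hti0, htin, htj0, htjm, htv⟩ := inv.entries t ht_mem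
  set heap1 := (h0 :: hs).erase t with hheap1
  set q1 : Int × Int := (t.2.1 + 1, t.2.2) with hq1
  set q2 : Int × Int := (t.2.1, t.2.2 + 1) with hq2
  set e1 : Int × Int × Int :=
    (-(PySem.List.pyGetD A' (t.2.1 + 1) 0 + PySem.List.pyGetD B' t.2.2 0), t.2.1 + 1, t.2.2) with he1
  set e2 : Int × Int × Int :=
    (-(PySem.List.pyGetD A' t.2.1 0 + PySem.List.pyGetD B' (t.2.2 + 1) 0), t.2.1, t.2.2 + 1) with he2
  have hq12 : q1 ≠ q2 := by
    intro h; rw [hq1, hq2] at h; simp only [Prod.mk.injEq] at h; omega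
  -- the erased heap
  have hperm : (h0 :: hs).Perm (t :: heap1) := List.perm_cons_erase ht_mem
  have hidxperm : ((h0 :: hs).map pvIdx).Perm (pvIdx t :: heap1.map pvIdx) := by
    simpa using hperm.map pvIdx
  have hnd : (pvIdx t :: heap1.map pvIdx).Nodup := hidxperm.nodup_iff.1 inv.nodupIdx
  have hnd1 : (heap1.map pvIdx).Nodup := (List.nodup_cons.1 hnd).2
  have hnotin1 : pvIdx t ∉ heap1.map pvIdx := (List.nodup_cons.1 hnd).1
  have hidxmem : ∀ q, q ∈ (h0 :: hs).map pvIdx ↔ q = pvIdx t ∨ q ∈ heap1.map pvIdx := by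
    intro q; rw [hidxperm.mem_iff]; simp
  have hsub1 : ∀ u ∈ heap1, u ∈ h0 :: hs := fun u hu => List.mem_of_mem_erase hu
  have hIdxv : ∀ q ∈ (h0 :: hs).map pvIdx, q ∈ visited := fun q hq => (inv.vmem q).2 (Or.inr hq)
  -- down-closure of the popped cell
  have hdownA : ∀ (d1 d2 : Int), (t.2.1 - d1, t.2.2 - d2) ∈ visited → (d1 = 1 ∧ d2 = 0) ∨ (d1 = 0 ∧ d2 = 1) →
      (t.2.1 - d1, t.2.2 - d2) ∈ P := by
    intro d1 d2 hvv hd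
    rcases (inv.vmem _).1 hvv with h | h
    · exact h
    · exfalso
      obtain ⟨u, hu, hue⟩ := List.mem_map.1 h
      obtain ⟨hui0, huin, huj0, hujm, huv⟩ := inv.entries u hu
      have hue1 : u.2.1 = t.2.1 - d1 ∧ u.2.2 = t.2.2 - d2 := by
        have := congrArg Prod.fst hue
        have := congrArg Prod.snd hue
        simp [pvIdx] at *
        omega
      have hmono1 : PySem.List.pyGetD A' t.2.1 0 ≤ PySem.List.pyGetD A' u.2.1 0 :=
        pvSorted_anti hA hui0 (by omega) htin
      have hmono2 : PySem.List.pyGetD B' t.2.2 0 ≤ PySem.List.pyGetD B' u.2.2 0 :=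
        pvSorted_anti hB huj0 (by omega) htjm
      have hle := ht_min u hu
      simp only [pvLexLe, Bool.or_eq_true, Bool.and_eq_true, decide_eq_true_eq] at hle
      simp only [pvSumAt, pvIdx] at huv htv
      omega
  have hdown1 : t.2.1 = 0 ∨ (t.2.1 - 1, t.2.2) ∈ P := by
    by_cases h0' : t.2.1 = 0
    · exact Or.inl h0'
    · right
      have htvis : pvIdx t ∈ visited := hIdxv _ (List.mem_map_of_mem ht_mem)
      rcases inv.vdown1 _ htvis with h | h
      · exact absurd h (by simpa [pvIdx] using h0')
      · simpa using hdownA 1 0 (by simpa [pvIdx] using h) (Or.inl ⟨rfl, rfl⟩)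
  have hdown2 : t.2.2 = 0 ∨ (t.2.1, t.2.2 - 1) ∈ P := by
    by_cases h0' : t.2.2 = 0
    · exact Or.inl h0'
    · right
      have htvis : pvIdx t ∈ visited := hIdxv _ (List.mem_map_of_mem ht_mem)
      rcases inv.vdown2 _ htvis with h | h
      · exact absurd h (by simpa [pvIdx] using h0')
      · simpa using hdownA 0 1 (by simpa [pvIdx] using h) (Or.inr ⟨rfl, rfl⟩)
  -- abstract conditions of the two pushes
  have hcontains : ∀ (s : PySem.Set (Int × Int)) (q : Int × Int),
      PySem.Set.contains s q = false ↔ q ∉ s := by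
    intro s q
    rcases h : PySem.Set.contains s q with _ | _
    · simp only [true_iff]
      intro hmem
      have := (PySem.Set.contains_iff s q).2 hmem
      rw [h] at this; cases this
    · simp [h, (PySem.Set.contains_iff s q).1 h]
  have htgrid : pvIdx t ∈ pvGrid A'.length B'.length := mem_pvGrid.2 ⟨hti0, htin, htj0, htjm⟩
  have hPt : pvIdx t ∉ P := fun hP => inv.disj _ hP (List.mem_map_of_mem ht_mem)
  have htvis : pvIdx t ∈ visited := hIdxv _ (List.mem_map_of_mem ht_mem)
  set C1 : Prop := (t.2.1 + 1 < (A'.length : Int) ∧ q1 ∉ visited) with hC1def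
  set C2 : Prop := (t.2.2 + 1 < (B'.length : Int) ∧ q2 ∉ visited) with hC2def
  have hDC1 : Decidable C1 := by rw [hC1def]; infer_instance
  have hDC2 : Decidable C2 := by rw [hC2def]; infer_instance
  have hsteq : pvPush2 A' B' t (pvPush1 A' B' t (heap1, visited)) =
      ((heap1 ++ (if C1 then [e1] else [])) ++ (if C2 then [e2] else []),
       (visited ++ (if C1 then [q1] else [])) ++ (if C2 then [q2] else [])) := by
    clear hsub1 hIdxv hdownA hdown1 hdown2
    rw [pvPush1]
    by_cases hc1 : C1
    · rw [if_pos (show t.2.1 + 1 < PySem.List.len A' ∧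
          PySem.Set.contains (heap1, visited).2 (t.2.1 + 1, t.2.2) = false from
          ⟨by rw [PySem.List.len_eq]; exact hc1.1, (hcontains _ _).2 hc1.2⟩)]
      rw [pvPush2]
      by_cases hc2 : C2
      · rw [if_pos (show t.2.2 + 1 < PySem.List.len B' ∧
            PySem.Set.contains (PySem.Set.add visited q1) (t.2.1, t.2.2 + 1) = false from
            ⟨by rw [PySem.List.len_eq]; exact hc2.1, (hcontains _ _).2 (by
              rw [PySem.Set.mem_add]; rintro (h | h); exact hc2.2 h; exact hq12 h.symm)⟩)]
        rw [if_pos hc1, if_pos hc2, PySem.Set.add_of_not_mem hc1.2,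
          PySem.Set.add_of_not_mem (show q2 ∉ visited ++ [q1] from by
            rw [List.mem_append, List.mem_singleton]
            rintro (h | h); exact hc2.2 h; exact hq12 h.symm)]
        simp [he1, he2, hc1, hc2]
      · rw [if_neg (show ¬ (t.2.2 + 1 < PySem.List.len B' ∧
            PySem.Set.contains (PySem.Set.add visited q1) (t.2.1, t.2.2 + 1) = false) from by
            rw [PySem.List.len_eq]
            rintro ⟨hlt, hcon⟩
            have := (hcontains _ _).1 hcon
            rw [PySem.Set.mem_add] at this
            exact hc2 ⟨hlt, fun hmem => this (Or.inl hmem)⟩)]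
        rw [if_pos hc1, if_neg hc2, PySem.Set.add_of_not_mem hc1.2]
        simp [he1, he2, hc1, hc2]
    · rw [if_neg (show ¬ (t.2.1 + 1 < PySem.List.len A' ∧
          PySem.Set.contains (heap1, visited).2 (t.2.1 + 1, t.2.2) = false) from by
          rw [PySem.List.len_eq]
          rintro ⟨hlt, hcon⟩
          exact hc1 ⟨hlt, (hcontains _ _).1 hcon⟩)]
      rw [pvPush2]
      by_cases hc2 : C2
      · rw [if_pos (show t.2.2 + 1 < PySem.List.len B' ∧
            PySem.Set.contains (heap1, visited).2 (t.2.1, t.2.2 + 1) = false from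
            ⟨by rw [PySem.List.len_eq]; exact hc2.1, (hcontains _ _).2 hc2.2⟩)]
        rw [if_neg hc1, if_pos hc2, PySem.Set.add_of_not_mem hc2.2]
        simp [he1, he2, hc1, hc2]
      · rw [if_neg (show ¬ (t.2.2 + 1 < PySem.List.len B' ∧
            PySem.Set.contains (heap1, visited).2 (t.2.1, t.2.2 + 1) = false) from by
            rw [PySem.List.len_eq]
            rintro ⟨hlt, hcon⟩
            exact hc2 ⟨hlt, (hcontains _ _).1 hcon⟩)]
        rw [if_neg hc1, if_neg hc2]
        simp [hc1, hc2]
  rw [hsteq]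
  dsimp only
  -- membership characterisations of the new state
  have hmemH : ∀ u, u ∈ (heap1 ++ (if C1 then [e1] else [])) ++ (if C2 then [e2] else []) ↔
      (u ∈ heap1 ∨ (C1 ∧ u = e1) ∨ (C2 ∧ u = e2)) := by
    intro u
    by_cases hc1 : C1 <;> by_cases hc2 : C2 <;> simp [hc1, hc2, or_assoc]
  have hidx2 : ((heap1 ++ (if C1 then [e1] else [])) ++ (if C2 then [e2] else [])).map pvIdx =
      (heap1.map pvIdx ++ (if C1 then [q1] else [])) ++ (if C2 then [q2] else []) := by
    by_cases hc1 : C1 <;> by_cases hc2 : C2 <;> simp [hc1, hc2, pvIdx, he1, he2, hq1, hq2]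
  have hmemI : ∀ q, q ∈ ((heap1 ++ (if C1 then [e1] else [])) ++ (if C2 then [e2] else [])).map pvIdx ↔
      (q ∈ heap1.map pvIdx ∨ (C1 ∧ q = q1) ∨ (C2 ∧ q = q2)) := by
    intro q
    rw [hidx2]
    by_cases hc1 : C1 <;> by_cases hc2 : C2 <;> simp [hc1, hc2, or_assoc]
  have hmemV : ∀ q, q ∈ (visited ++ (if C1 then [q1] else [])) ++ (if C2 then [q2] else []) ↔
      (q ∈ visited ∨ (C1 ∧ q = q1) ∨ (C2 ∧ q = q2)) := by
    intro q
    by_cases hc1 : C1 <;> by_cases hc2 : C2 <;> simp [hc1, hc2, or_assoc]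
  have hmemP : ∀ q, q ∈ P ++ [pvIdx t] ↔ (q ∈ P ∨ q = pvIdx t) := by
    intro q; simp
  have hh1v : ∀ q ∈ heap1.map pvIdx, q ∈ visited := fun q hq =>
    hIdxv q ((hidxmem q).2 (Or.inr hq))
  have hPv : ∀ q ∈ P, q ∈ visited := fun q hq => (inv.vmem q).2 (Or.inl hq)
  refine ⟨?_, ?_, ?_, ?_, ?_, ?_, ?_, ?_, ?_, ?_, ?_, ?_⟩
  · -- entries
    intro u hu
    rcases (hmemH u).1 hu with h | ⟨hc, rfl⟩ | ⟨hc, rfl⟩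
    · exact inv.entries u (hsub1 u h)
    · refine ⟨?_, ?_, ?_, ?_, ?_⟩ <;> simp [he1, pvSumAt, pvIdx] <;> omega
    · refine ⟨?_, ?_, ?_, ?_, ?_⟩ <;> simp [he2, pvSumAt, pvIdx] <;> omega
  · -- nodupIdx
    rw [hidx2]
    have base : ∀ (l : List (Int × Int)) (q : Int × Int), l.Nodup → q ∉ l → (l ++ [q]).Nodup := by
      intro l q h1 h2
      rw [List.nodup_append]
      refine ⟨h1, List.nodup_singleton q, fun a ha b hb => ?_⟩
      rw [List.mem_singleton] at hb
      subst hb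
      exact fun he => h2 (he ▸ ha)
    by_cases hc1 : C1 <;> by_cases hc2 : C2
    · rw [if_pos hc1, if_pos hc2]
      refine base _ _ (base _ _ hnd1 (fun h => hc1.2 (hh1v _ h))) ?_
      rw [List.mem_append, List.mem_singleton]
      rintro (h | h)
      · exact hc2.2 (hh1v _ h)
      · exact hq12 h.symm
    · rw [if_pos hc1, if_neg hc2]
      simpa using base _ _ hnd1 (fun h => hc1.2 (hh1v _ h))
    · rw [if_neg hc1, if_pos hc2]
      simpa using base _ _ hnd1 (fun h => hc2.2 (hh1v _ h))
    · rw [if_neg hc1, if_neg hc2]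
      simpa using hnd1
  · -- Pgrid
    intro p hp
    rcases (hmemP p).1 hp with h | rfl
    · exact inv.Pgrid p h
    · exact htgrid
  · -- Pdown1
    intro p hp
    rcases (hmemP p).1 hp with h | rfl
    · rcases inv.Pdown1 p h with h' | h'
      · exact Or.inl h'
      · exact Or.inr ((hmemP _).2 (Or.inl h'))
    · rcases hdown1 with h' | h'
      · exact Or.inl h'
      · exact Or.inr ((hmemP _).2 (Or.inl h'))
  · -- Pdown2
    intro p hp
    rcases (hmemP p).1 hp with h | rfl
    · rcases inv.Pdown2 p h with h' | h'
      · exact Or.inl h'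
      · exact Or.inr ((hmemP _).2 (Or.inl h'))
    · rcases hdown2 with h' | h'
      · exact Or.inl h'
      · exact Or.inr ((hmemP _).2 (Or.inl h'))
  · -- Pclose1
    intro p hp hlt
    rcases (hmemP p).1 hp with h | rfl
    · exact (hmemV _).2 (Or.inl (inv.Pclose1 p h hlt))
    · by_cases hv1 : q1 ∈ visited
      · exact (hmemV _).2 (Or.inl hv1)
      · exact (hmemV _).2 (Or.inr (Or.inl ⟨⟨hlt, hv1⟩, rfl⟩))
  · -- Pclose2
    intro p hp hlt
    rcases (hmemP p).1 hp with h | rfl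
    · exact (hmemV _).2 (Or.inl (inv.Pclose2 p h hlt))
    · by_cases hv2 : q2 ∈ visited
      · exact (hmemV _).2 (Or.inl hv2)
      · exact (hmemV _).2 (Or.inr (Or.inr ⟨⟨hlt, hv2⟩, rfl⟩))
  · -- vmem
    intro q
    rw [hmemV, hmemI, hmemP]
    constructor
    · rintro (hq | hq | hq)
      · rcases (inv.vmem q).1 hq with h | h
        · exact Or.inl (Or.inl h)
        · rcases (hidxmem q).1 h with h' | h'
          · exact Or.inl (Or.inr h')
          · exact Or.inr (Or.inl h')
      · exact Or.inr (Or.inr (Or.inl hq))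
      · exact Or.inr (Or.inr (Or.inr hq))
    · rintro ((hq | hq) | (hq | hq | hq))
      · exact Or.inl (hPv q hq)
      · subst hq; exact Or.inl htvis
      · exact Or.inl (hh1v q hq)
      · exact Or.inr (Or.inl hq)
      · exact Or.inr (Or.inr hq)
  · -- disj
    intro q hq hqI
    rcases (hmemI q).1 hqI with h | ⟨hc, rfl⟩ | ⟨hc, rfl⟩
    · rcases (hmemP q).1 hq with h' | rfl
      · exact inv.disj q h' ((hidxmem q).2 (Or.inr h))
      · exact hnotin1 h
    · rcases (hmemP _).1 hq with h' | h'
      · exact hc.2 (hPv _ h')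
      · rw [hq1] at h'
        have := congrArg Prod.fst h'
        simp [pvIdx] at this
    · rcases (hmemP _).1 hq with h' | h'
      · exact hc.2 (hPv _ h')
      · rw [hq2] at h'
        have := congrArg Prod.snd h'
        simp [pvIdx] at this
  · -- vdown1
    intro p hp
    rcases (hmemV p).1 hp with h | ⟨hc, rfl⟩ | ⟨hc, rfl⟩
    · rcases inv.vdown1 p h with h' | h'
      · exact Or.inl h'
      · exact Or.inr ((hmemV _).2 (Or.inl h'))
    · refine Or.inr ((hmemV _).2 (Or.inl ?_))
      rw [hq1]
      have he : ((t.2.1 + 1 - 1 : Int), t.2.2) = pvIdx t := by simp [pvIdx]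
      simpa [he] using htvis
    · rw [hq2]
      rcases hdown1 with h' | h'
      · exact Or.inl h'
      · refine Or.inr ((hmemV _).2 (Or.inl ?_))
        have := inv.Pclose2 _ h' (by simpa using hc.1)
        simpa using this
  · -- vdown2
    intro p hp
    rcases (hmemV p).1 hp with h | ⟨hc, rfl⟩ | ⟨hc, rfl⟩
    · rcases inv.vdown2 p h with h' | h'
      · exact Or.inl h'
      · exact Or.inr ((hmemV _).2 (Or.inl h'))
    · rw [hq1]
      rcases hdown2 with h' | h'
      · exact Or.inl h'
      · refine Or.inr ((hmemV _).2 (Or.inl ?_))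
        have := inv.Pclose1 _ h' (by simpa using hc.1)
        simpa using this
    · refine Or.inr ((hmemV _).2 (Or.inl ?_))
      rw [hq2]
      have he : ((t.2.1 : Int), t.2.2 + 1 - 1) = pvIdx t := by simp [pvIdx]
      simpa [he] using htvis
  · -- origin
    exact (hmemV _).2 (Or.inl inv.origin)

-- the main loop lemma
theorem pvLoop_eq (A' B' : List Int)
    (hA : A'.Pairwise (fun x y => y ≤ x)) (hB : B'.Pairwise (fun x y => y ≤ x)) :
    ∀ (fuel : Nat) (heap : List (Int × Int × Int)) (visited P : List (Int × Int)) (res : List Int),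
      PvInv A' B' heap visited P →
      res ++ pvS (pvRem A' B' P) = pvS (pvAll A' B') →
      pvLoop A' B' fuel heap visited res = (pvS (pvAll A' B')).take (res.length + fuel) := by
  intro fuel
  induction fuel with
  | zero =>
    intro heap visited P res inv hconcat
    have hres : res = (pvS (pvAll A' B')).take res.length := by
      rw [← hconcat]; exact (List.take_left ..).symm
    cases heap <;> simpa [pvLoop] using hres
  | succ fuel ih =>
    intro heap visited P res inv hconcat
    rcases heap with _ | ⟨h0, hs⟩
    · -- heap exhausted: everything is popped
      have hrem : pvRem A' B' P = [] := by
        rw [pvRem, List.map_eq_nil_iff, List.filter_eq_nil_iff]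
        intro p hp
        simp only [decide_eq_true_eq, not_not]
        by_contra hP
        obtain ⟨u, hu, -⟩ := pvAncestor inv p hp (by simpa using hP)
        exact absurd hu (List.not_mem_nil)
      rw [hrem] at hconcat
      have hres : res = pvS (pvAll A' B') := by
        simpa [pvS, PySem.List.sorted] using hconcat
      rw [show pvLoop A' B' (fuel + 1) [] visited res = res from rfl, hres,
        List.take_of_length_le (by omega)]
    · obtain ⟨htgrid, htP, htv, hmax⟩ := pvPop_facts hA hB inv
      have inv2 := pvStepInv hA hB inv
      set t := pvMinEntry h0 hs with ht
      have hsmem : pvSumAt A' B' (pvIdx t) ∈ pvRem A' B' P :=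
        List.mem_map_of_mem (List.mem_filter.2 ⟨htgrid, by simpa using htP⟩)
      have hsort := pvS_max_cons hsmem hmax
      have hstep := pvRem_step A' B' P (pvIdx t) htgrid htP
      have hconcat2 : (res ++ [-t.1]) ++ pvS (pvRem A' B' (P ++ [pvIdx t])) = pvS (pvAll A' B') := by
        rw [pvS_congr hstep, htv, neg_neg, List.append_assoc, ← hconcat, List.singleton_append, ← hsort]
      have hloop : pvLoop A' B' (fuel + 1) (h0 :: hs) visited res =
          pvLoop A' B' fuel
            (pvPush2 A' B' t (pvPush1 A' B' t ((h0 :: hs).erase t, visited))).1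
            (pvPush2 A' B' t (pvPush1 A' B' t ((h0 :: hs).erase t, visited))).2
            (res ++ [-t.1]) := rfl
      rw [hloop, ih _ _ (P ++ [pvIdx t]) (res ++ [-t.1]) inv2 hconcat2]
      congr 1
      simp
      omega

-- ===== VERDICT (by name: the statement is the Claim_ definition above) =====
theorem solve_spec : Claim_equal_solve := by
  intro A B C _ hpre
  unfold Spec_solve solve solve_alt
  dsimp only
  set A' := PySem.List.sorted A (fun x => x) true with hA'
  set B' := PySem.List.sorted B (fun x => x) true with hB'
  have hAlen : 0 < A'.length := by
    rw [hA', PySem.List.length_sorted]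
    exact List.length_pos_iff.2 hpre.1
  have hBlen : 0 < B'.length := by
    rw [hB', PySem.List.length_sorted]
    exact List.length_pos_iff.2 hpre.2
  have hga : PySem.List.pyGet? A' 0 = some A'[0] := by
    rw [show (0 : Int) = ((0 : Nat) : Int) from rfl, PySem.List.pyGet?_natCast]
    exact List.getElem?_eq_getElem hAlen
  have hgb : PySem.List.pyGet? B' 0 = some B'[0] := by
    rw [show (0 : Int) = ((0 : Nat) : Int) from rfl, PySem.List.pyGet?_natCast]
    exact List.getElem?_eq_getElem hBlen
  rw [hga, hgb]
  dsimp only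
  have hget1 : PySem.List.pyGetD A' 0 0 = A'[0] :=
    PySem.List.pyGetD_eq_getElem A' 0 le_rfl (by exact_mod_cast hAlen)
  have hget2 : PySem.List.pyGetD B' 0 0 = B'[0] :=
    PySem.List.pyGetD_eq_getElem B' 0 le_rfl (by exact_mod_cast hBlen)
  have hvis : PySem.Set.add PySem.Set.empty ((0 : Int), (0 : Int)) = [((0 : Int), (0 : Int))] := rfl
  have inv0 : PvInv A' B' [(-(A'[0] + B'[0]), 0, 0)] [((0 : Int), (0 : Int))] [] := by
    refine ⟨?_, ?_, ?_, ?_, ?_, ?_, ?_, ?_, ?_, ?_, ?_, ?_⟩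
    · intro u hu
      rw [List.mem_singleton] at hu
      subst hu
      refine ⟨?_, ?_, ?_, ?_, ?_⟩ <;> simp [pvSumAt, pvIdx, hget1, hget2] <;> omega
    · simp
    · intro p hp; cases hp
    · intro p hp; cases hp
    · intro p hp; cases hp
    · intro p hp; cases hp
    · intro p hp; cases hp
    · intro q; simp [pvIdx]
    · intro q hq; cases hq
    · intro p hp
      rw [List.mem_singleton] at hp
      subst hp
      exact Or.inl rfl
    · intro p hp
      rw [List.mem_singleton] at hp
      subst hp
      exact Or.inl rfl
    · simp
  have hconcat0 : ([] : List Int) ++ pvS (pvRem A' B' []) = pvS (pvAll A' B') := by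
    rw [pvRem_nil, List.nil_append]
  have hA'' : A'.Pairwise (fun x y => y ≤ x) :=
    PySem.List.sorted_pairwise_rev (xs := A) (key := fun x => x)
  have hB'' : B'.Pairwise (fun x y => y ≤ x) :=
    PySem.List.sorted_pairwise_rev (xs := B) (key := fun x => x)
  rw [hvis]
  rw [pvLoop_eq A' B' hA'' hB'' C.toNat [(-(A'[0] + B'[0]), 0, 0)]
    [((0 : Int), (0 : Int))] [] [] inv0 hconcat0]
  rw [show (PySem.List.sorted (A'.flatMap fun a => B'.map fun b => a + b) (fun x => x) true)
      = pvS (pvAll A' B') from by rw [pvAll_eq]; rfl]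
  rw [PySem.List.slice_to _ (le_max_right C 0)]
  congr 1
  simp
  omega
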